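-- pv_equiv track=rewrite | github.com/rafliard23/txr-use-py | utils/utils.py | int_to_bool_list
-- ===== SOURCE A (Python) =====
-- def int_to_bool_list(value: int, length=None) -> list:
--     # Convert int to list of bools. Index 0 is LSB
--     # If length given, list will be padded/truncated
--     bool_list = []
--     while value > 0:
--         bool_list.append(bool(value & 1))
--         value >>= 1
--
--     if length is not None:
--         # Pad or truncate to match desired length
--         bool_list = (bool_list + [False] * length)[:length]
--     return bool_list
-- ===== SOURCE B (Python) =====
-- def int_to_bool_list(value: int, length=None) -> list:
--     # Build the LSB-first bit list from the binary string representation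
--     bool_list = [c == '1' for c in bin(value)[2:][::-1]] if value > 0 else []
--     if length is not None:
--         # Pad or truncate to match desired length
--         bool_list = (bool_list + [False] * length)[:length]
--     return bool_list
-- ===== Notes on version B (the rewrite author's own statement) =====
-- stated objective: idiomatic
-- what changed: B derives the LSB-first bit list from the binary string (bin(value)[2:][::-1] with a comprehension) instead of A's explicit while loop with bit masking and shifting; the padding/truncation tail is unchanged.
import Mathlib
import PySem

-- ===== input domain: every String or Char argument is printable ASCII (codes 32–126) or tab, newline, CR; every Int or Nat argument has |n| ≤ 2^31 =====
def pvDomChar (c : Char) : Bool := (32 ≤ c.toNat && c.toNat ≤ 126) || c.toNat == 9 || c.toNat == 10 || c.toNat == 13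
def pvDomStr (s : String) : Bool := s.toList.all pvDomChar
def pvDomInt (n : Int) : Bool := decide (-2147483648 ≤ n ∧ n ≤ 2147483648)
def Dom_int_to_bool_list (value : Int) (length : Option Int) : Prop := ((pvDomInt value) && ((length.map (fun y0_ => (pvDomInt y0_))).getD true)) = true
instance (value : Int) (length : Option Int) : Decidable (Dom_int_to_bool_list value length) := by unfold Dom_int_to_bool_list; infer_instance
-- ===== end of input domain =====

-- B builds the LSB-first bit list from the binary-string representation (bin(value)[2:][::-1])
-- instead of A's bit-arithmetic while loop; objective: idiomatic, same cost.

-- ===== PORT A =====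
-- the while loop: bool(value & 1) is (value & 1) ≠ 0; value >>= 1 is Int '>>> 1' (exact)
def int_to_bool_list_loop (value : Int) (bool_list : List Bool) : List Bool :=
  if 0 < value then
    int_to_bool_list_loop (value >>> (1 : Nat)) (bool_list ++ [decide (PySem.Int.band value 1 ≠ 0)])
  else bool_list
termination_by value.toNat
decreasing_by simp only [Int.shiftRight_eq_div_pow, pow_one]; omega

def int_to_bool_list (value : Int) (length : Option Int) : List Bool :=
  let bool_list := int_to_bool_list_loop value []
  match length with
  | some l => PySem.List.slice (bool_list ++ List.replicate l.toNat false) none (some l)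
  | none => bool_list

-- ===== PORT B =====
-- bin(n)[2:] for n > 0, MSB first (exact: Python's bin builds these digits)
def binChars : Nat → List Char
  | 0 => []
  | n + 1 => binChars ((n + 1) / 2) ++ [if (n + 1) % 2 == 1 then '1' else '0']
decreasing_by omega

def int_to_bool_list_alt (value : Int) (length : Option Int) : List Bool :=
  -- [c == '1' for c in bin(value)[2:][::-1]] if value > 0 else []
  let bool_list := if 0 < value then (binChars value.toNat).reverse.map (fun c => c == '1') else []
  match length with
  | some l => PySem.List.slice (bool_list ++ List.replicate l.toNat false) none (some l)
  | none => bool_list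

-- ===== PRECONDITION & SPEC =====
def Spec_int_to_bool_list (value : Int) (length : Option Int) (out : List Bool) : Prop := out = int_to_bool_list_alt value length
instance (value : Int) (length : Option Int) (out : List Bool) : Decidable (Spec_int_to_bool_list value length out) := by unfold Spec_int_to_bool_list; infer_instance

-- ===== CLAIM (what is proved, stated in full; the proofs are below) =====
def Claim_equal_int_to_bool_list : Prop := ∀ (value : Int) (length : Option Int), Dom_int_to_bool_list value length → Spec_int_to_bool_list value length (int_to_bool_list value length)

-- ===== LEMMAS AND PROOFS =====

lemma loop_eq_binChars : ∀ (n : Nat) (v : Int), v.toNat = n → ∀ acc,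
    int_to_bool_list_loop v acc = acc ++ (binChars v.toNat).reverse.map (fun c => c == '1') := by
  intro n
  induction n using Nat.strong_induction_on with
  | _ n ih =>
    intro v hv acc
    rw [int_to_bool_list_loop]
    by_cases h : 0 < v
    · simp only [h, if_true]
      have hsh : v >>> (1 : Nat) = v / 2 := by
        simp [Int.shiftRight_eq_div_pow]
      have hlt : (v >>> (1 : Nat)).toNat < n := by rw [hsh]; omega
      rw [ih _ hlt _ rfl]
      have hband : PySem.Int.band v 1 = v % 2 := by
        rw [PySem.Int.band_one, PySem.Int.mod_eq_emod_of_pos (by norm_num)]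
      obtain ⟨m, hm⟩ : ∃ m, v.toNat = m + 1 := ⟨v.toNat - 1, by omega⟩
      have hdigits : (v >>> (1 : Nat)).toNat = (m + 1) / 2 := by rw [hsh]; omega
      rw [hdigits, hm, binChars]
      have hbit : (decide (PySem.Int.band v 1 ≠ 0))
          = ((if (m + 1) % 2 == 1 then '1' else '0') == '1') := by
        rw [hband]
        by_cases hp : (m + 1) % 2 = 1
        · have : v % 2 = 1 := by omega
          simp [hp, this]
        · have : v % 2 = 0 := by omega
          simp [hp, this]
      simp [hbit]
    · simp only [h, if_false]
      have : v.toNat = 0 := by omega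
      simp [this, binChars]

lemma bool_list_eq (value : Int) :
    int_to_bool_list_loop value []
      = (if 0 < value then (binChars value.toNat).reverse.map (fun c => c == '1') else []) := by
  rw [loop_eq_binChars value.toNat value rfl]
  by_cases h : 0 < value
  · simp [h]
  · have : value.toNat = 0 := by omega
    simp [h, this, binChars]

-- ===== VERDICT (by name: the statement is the Claim_ definition above) =====
theorem int_to_bool_list_spec : Claim_equal_int_to_bool_list := by
  intro value length _
  unfold Spec_int_to_bool_list int_to_bool_list int_to_bool_list_alt
  rw [bool_list_eq]
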